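-- pv_equiv track=rewrite | github.com/Lenala39/Adversarial_TemplateFilling | Attacking_CLARE.py | index_from_pos_tag
-- ===== SOURCE A (Python) =====
-- pos_tag_filter = {
--                     'replace': set(['NOUN', 'VERB', 'ADJ', 'X', 'NUM', 'ADV']),
--                     'insert': set(['NOUN/NOUN', 'ADJ/NOUN', 'NOUN/VERB', 'NOUN/ADP',
--                                'ADP/NOUN', 'NOUN/.', 'VERB/NOUN', 'DET/NOUN',
--                                'VERB/ADJ', './NOUN', 'VERB/VERB', 'VERB/DET',
--                                'DET/ADJ', 'ADJ/ADJ', 'VERB/ADP', 'NOUN/CONJ',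
--                                'NOUN/ADJ', 'PRT/VERB', 'ADP/DET', 'ADP/ADJ',
--                                'PRON/NOUN', 'VERB/PRON', './X', './DET']),
--                     'merge': set(['NOUN/NOUN', 'ADJ/NOUN', 'VERB/ADJ', 'VERB/NOUN',
--                               'VERB/VERB', 'NOUN/VERB', 'DET/ADJ', 'ADJ/ADJ',
--                               'DET/NOUN', 'NUM/NOUN', 'PRON/NOUN', 'NOUN/ADJ',
--                               'ADV/VERB', 'VERB/ADV', 'PRON/ADJ'])
--                  }
--
-- def index_from_pos_tag(token_tags):
--     replace_loc, insert_loc, merge_loc = [], [], []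
--     for idx in range(len(token_tags)):
--         if token_tags[idx][1] in pos_tag_filter['replace']:
--             replace_loc.append(idx)
--         if idx > 0 and "%s/%s" % (token_tags[idx-1][1], token_tags[idx][1]) \
--             in pos_tag_filter['insert']:
--             insert_loc.append(idx)
--         if idx < len(token_tags) - 1 and \
--             "%s/%s" % (token_tags[idx][1], token_tags[idx+1][1]) in pos_tag_filter['merge']:
--             merge_loc.append(idx)
--     return replace_loc, insert_loc, merge_loc
-- ===== SOURCE B (Python) =====
-- pos_tag_filter = {
--                     'replace': set(['NOUN', 'VERB', 'ADJ', 'X', 'NUM', 'ADV']),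
--                     'insert': set(['NOUN/NOUN', 'ADJ/NOUN', 'NOUN/VERB', 'NOUN/ADP',
--                                'ADP/NOUN', 'NOUN/.', 'VERB/NOUN', 'DET/NOUN',
--                                'VERB/ADJ', './NOUN', 'VERB/VERB', 'VERB/DET',
--                                'DET/ADJ', 'ADJ/ADJ', 'VERB/ADP', 'NOUN/CONJ',
--                                'NOUN/ADJ', 'PRT/VERB', 'ADP/DET', 'ADP/ADJ',
--                                'PRON/NOUN', 'VERB/PRON', './X', './DET']),
--                     'merge': set(['NOUN/NOUN', 'ADJ/NOUN', 'VERB/ADJ', 'VERB/NOUN',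
--                               'VERB/VERB', 'NOUN/VERB', 'DET/ADJ', 'ADJ/ADJ',
--                               'DET/NOUN', 'NUM/NOUN', 'PRON/NOUN', 'NOUN/ADJ',
--                               'ADV/VERB', 'VERB/ADV', 'PRON/ADJ'])
--                  }
--
-- def index_from_pos_tag(token_tags):
--     # Inverted-index approach: group positions by unigram tag and by adjacent
--     # bigram once, then answer each category by dictionary lookup + sort.
--     tags = [t for _, t in token_tags]
--     uni = {}
--     for i, t in enumerate(tags):
--         uni.setdefault(t, []).append(i)
--     bi = {}
--     for i, (a, b) in enumerate(zip(tags, tags[1:])):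
--         bi.setdefault(a + "/" + b, []).append(i)
--     replace_loc = sorted(i for t in pos_tag_filter['replace'] for i in uni.get(t, []))
--     insert_loc = sorted(i + 1 for bg in pos_tag_filter['insert'] for i in bi.get(bg, []))
--     merge_loc = sorted(i for bg in pos_tag_filter['merge'] for i in bi.get(bg, []))
--     return replace_loc, insert_loc, merge_loc
-- ===== Notes on version B (the rewrite author's own statement) =====
-- stated objective: alternative
-- what changed: A tests each index against the unigram/bigram filter sets in one range(len) loop with neighbor-offset lookups; B builds inverted indexes (tag -> positions, bigram -> positions) in grouping dictionaries and answers each category by looking up the filter tags in those dictionaries and sorting the collected positions, so no per-index set-membership tests remain.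
import Mathlib
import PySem

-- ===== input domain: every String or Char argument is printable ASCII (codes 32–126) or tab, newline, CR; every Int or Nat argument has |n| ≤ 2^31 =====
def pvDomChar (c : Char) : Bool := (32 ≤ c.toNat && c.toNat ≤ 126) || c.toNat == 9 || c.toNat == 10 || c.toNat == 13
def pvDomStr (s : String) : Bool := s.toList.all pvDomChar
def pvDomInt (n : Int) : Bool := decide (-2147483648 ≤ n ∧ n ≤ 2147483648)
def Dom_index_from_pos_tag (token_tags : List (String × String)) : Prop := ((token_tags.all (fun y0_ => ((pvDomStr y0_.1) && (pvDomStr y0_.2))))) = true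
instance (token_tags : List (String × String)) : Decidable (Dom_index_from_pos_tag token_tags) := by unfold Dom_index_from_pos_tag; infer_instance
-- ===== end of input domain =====

-- B builds inverted indexes (tag -> positions, adjacent-bigram -> positions) in grouping
-- dictionaries once and answers each category by looking up the filter tags and sorting the
-- collected positions (objective: alternative algorithm/data structure; same practical cost).


-- module-level constant pos_tag_filter (shared by A and B, like the Python module)
def pvReplaceTags : List String := ["NOUN", "VERB", "ADJ", "X", "NUM", "ADV"]
def pvInsertTags : List String :=
  ["NOUN/NOUN", "ADJ/NOUN", "NOUN/VERB", "NOUN/ADP", "ADP/NOUN", "NOUN/.", "VERB/NOUN",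
   "DET/NOUN", "VERB/ADJ", "./NOUN", "VERB/VERB", "VERB/DET", "DET/ADJ", "ADJ/ADJ",
   "VERB/ADP", "NOUN/CONJ", "NOUN/ADJ", "PRT/VERB", "ADP/DET", "ADP/ADJ", "PRON/NOUN",
   "VERB/PRON", "./X", "./DET"]
def pvMergeTags : List String :=
  ["NOUN/NOUN", "ADJ/NOUN", "VERB/ADJ", "VERB/NOUN", "VERB/VERB", "NOUN/VERB", "DET/ADJ",
   "ADJ/ADJ", "DET/NOUN", "NUM/NOUN", "PRON/NOUN", "NOUN/ADJ", "ADV/VERB", "VERB/ADV",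
   "PRON/ADJ"]

-- ===== PORT A =====
-- literal port: one index loop over range(len(token_tags)); token_tags[idx] is always in
-- range, ported as pyGetD (the default is never read)
def index_from_pos_tag (token_tags : List (String × String)) : List Int × List Int × List Int :=
  let n : Int := token_tags.length
  (PySem.List.pyRange 0 n 1).foldl
    (fun (s : List Int × List Int × List Int) idx =>
      (if pvReplaceTags.contains (PySem.List.pyGetD token_tags idx ("", "")).2
         then s.1 ++ [idx] else s.1,
       if decide (0 < idx) &&
            pvInsertTags.contains ((PySem.List.pyGetD token_tags (idx - 1) ("", "")).2 ++ "/" ++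
              (PySem.List.pyGetD token_tags idx ("", "")).2)
         then s.2.1 ++ [idx] else s.2.1,
       if decide (idx < n - 1) &&
            pvMergeTags.contains ((PySem.List.pyGetD token_tags idx ("", "")).2 ++ "/" ++
              (PySem.List.pyGetD token_tags (idx + 1) ("", "")).2)
         then s.2.2 ++ [idx] else s.2.2))
    ([], [], [])

-- ===== PORT B =====
-- grouping dictionaries built with setdefault(k, []).append(v) == modify k [] (· ++ [v]);
-- the Python iterates the module-level sets, whose arbitrary order the final sorted() erases:
-- the port iterates the same distinct elements in the literal order
def index_from_pos_tag_alt (token_tags : List (String × String)) : List Int × List Int × List Int :=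
  let tags := token_tags.map (·.2)
  let uni := (PySem.List.enumerate tags 0).foldl
      (fun (d : PySem.Dict String (List Int)) p => d.modify p.2 [] (· ++ [p.1]))
      PySem.Dict.empty
  let bi := (PySem.List.enumerate (tags.zip tags.tail) 0).foldl
      (fun (d : PySem.Dict String (List Int)) p => d.modify (p.2.1 ++ "/" ++ p.2.2) [] (· ++ [p.1]))
      PySem.Dict.empty
  let replace_loc := PySem.List.sorted (pvReplaceTags.flatMap (fun t => uni.getD t [])) (fun x => x) false
  let insert_loc := PySem.List.sorted
      (pvInsertTags.flatMap (fun bg => (bi.getD bg []).map (· + 1))) (fun x => x) false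
  let merge_loc := PySem.List.sorted (pvMergeTags.flatMap (fun bg => bi.getD bg [])) (fun x => x) false
  (replace_loc, insert_loc, merge_loc)

-- ===== PRECONDITION & SPEC =====
def Spec_index_from_pos_tag (token_tags : List (String × String)) (out : List Int × List Int × List Int) : Prop := out = index_from_pos_tag_alt token_tags
instance (token_tags : List (String × String)) (out : List Int × List Int × List Int) : Decidable (Spec_index_from_pos_tag token_tags out) := by unfold Spec_index_from_pos_tag; infer_instance

-- ===== CLAIM (what is proved, stated in full; the proofs are below) =====
def Claim_equal_index_from_pos_tag : Prop := ∀ (token_tags : List (String × String)), Dom_index_from_pos_tag token_tags → Spec_index_from_pos_tag token_tags (index_from_pos_tag token_tags)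

-- ===== LEMMAS AND PROOFS =====

-- canonical form shared by both directions of the proof:
-- (filter over enumerate(tags), pair-filters over enumerate(zip))
def pvCanon (token_tags : List (String × String)) : List Int × List Int × List Int :=
  let tags := token_tags.map (·.2)
  let replace_loc := (PySem.List.enumerate tags 0).filterMap
    (fun p => if pvReplaceTags.contains p.2 then some p.1 else none)
  let im := (PySem.List.enumerate (tags.zip tags.tail) 0).foldl
    (fun (s : List Int × List Int) p =>
      (if pvInsertTags.contains (p.2.1 ++ "/" ++ p.2.2) then s.1 ++ [p.1 + 1] else s.1,
       if pvMergeTags.contains (p.2.1 ++ "/" ++ p.2.2) then s.2 ++ [p.1] else s.2))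
    ([], [])
  (replace_loc, im.1, im.2)

-- split A's sequential triple-accumulator loop into three independent filters
theorem pv_foldl3 (l : List Int) (c1 c2 c3 : Int → Bool) (b c d : List Int) :
    l.foldl (fun s x =>
        (if c1 x then s.1 ++ [x] else s.1,
         if c2 x then s.2.1 ++ [x] else s.2.1,
         if c3 x then s.2.2 ++ [x] else s.2.2)) (b, c, d) =
      (b ++ l.filter c1, c ++ l.filter c2, d ++ l.filter c3) := by
  induction l generalizing b c d with
  | nil => simp
  | cons x t ih =>
    simp only [List.foldl_cons, List.filter_cons, ih]
    split_ifs <;> simp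

-- split the canonical pair loop into the two filtered projections
theorem pv_foldl2 (l : List (Int × String × String)) (c1 c2 : Int × String × String → Bool)
    (b c : List Int) :
    l.foldl (fun s p =>
        (if c1 p then s.1 ++ [p.1 + 1] else s.1,
         if c2 p then s.2 ++ [p.1] else s.2)) (b, c) =
      (b ++ (l.filter c1).map (fun p => p.1 + 1), c ++ (l.filter c2).map (fun p => p.1)) := by
  induction l generalizing b c with
  | nil => simp
  | cons x t ih =>
    simp only [List.foldl_cons, List.filter_cons, ih]
    split_ifs <;> simp

theorem pv_filterMap_if_map {α β : Type} (p : α → Bool) (g : α → β) (l : List α) :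
    l.filterMap (fun x => if p x then some (g x) else none) = (l.filter p).map g := by
  induction l with
  | nil => rfl
  | cons x t ih =>
    simp only [List.filterMap_cons, List.filter_cons]
    split_ifs <;> simp [ih]

theorem pv_filterMap_if {α : Type} (p : α → Bool) (l : List α) :
    l.filterMap (fun x => if p x then some x else none) = l.filter p := by
  induction l with
  | nil => rfl
  | cons x t ih =>
    simp only [List.filterMap_cons, List.filter_cons]
    split_ifs <;> simp [ih]

theorem pv_tag (tt : List (String × String)) (i : Int) :
    PySem.List.pyGetD (tt.map (fun p => p.2)) i "" = (PySem.List.pyGetD tt i ("", "")).2 :=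
  PySem.List.pyGetD_map (fun p => p.2) tt i ("", "")

theorem pv_getZ (tags : List String) (j : Int) (h0 : 0 ≤ j) (h1 : j < (tags.length : Int) - 1) :
    PySem.List.pyGetD (tags.zip tags.tail) j ("", "") =
      (PySem.List.pyGetD tags j "", PySem.List.pyGetD tags (j + 1) "") := by
  have hz : (tags.zip tags.tail).length = tags.length - 1 := by
    simp [List.length_zip, List.length_tail]
  have hj : j.toNat < (tags.zip tags.tail).length := by omega
  rw [PySem.List.pyGetD_eq_getElem _ _ h0 (by omega),
      PySem.List.pyGetD_eq_getElem _ _ h0 (by omega),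
      PySem.List.pyGetD_eq_getElem _ _ (by omega : (0:Int) ≤ j + 1) (by omega)]
  rw [List.getElem_zip, List.getElem_tail]
  have : (j + 1).toNat = j.toNat + 1 := by omega
  simp [this]

theorem pv_range_shift (b : Int) (hb : 0 ≤ b) :
    PySem.List.pyRange 1 (b + 1) = (PySem.List.pyRange 0 b).map (fun j => j + 1) := by
  rw [PySem.List.pyRange_one, PySem.List.pyRange_one, List.map_map]
  have : (b + 1 - 1).toNat = (b - 0).toNat := by omega
  rw [this]
  apply List.map_congr_left
  intro k _
  simp [Function.comp]
  omega

-- A reduces to the canonical form (for nonempty input)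
theorem pv_A_eq_canon_pos (tt : List (String × String)) (hN : 1 ≤ tt.length) :
    index_from_pos_tag tt = pvCanon tt := by
  simp only [index_from_pos_tag, pvCanon]
  rw [pv_foldl3]
  rw [PySem.List.enumerate_eq_map_pyRange _ "", PySem.List.enumerate_eq_map_pyRange _ ("", "")]
  rw [List.filterMap_map, pv_foldl2]
  simp only [List.nil_append, PySem.List.len_eq, List.length_map, List.length_zip,
    List.length_tail, Function.comp]
  rw [pv_filterMap_if]
  have hmin : min tt.length (tt.length - 1) = tt.length - 1 := by omega
  have hz : ((tt.length - 1 : Nat) : Int) = (tt.length : Int) - 1 := by omega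
  rw [hmin, hz]
  simp only [Prod.mk.injEq]
  refine ⟨?_, ?_, ?_⟩
  · -- replace
    apply List.filter_congr
    intro j _
    rw [pv_tag]
  · -- insert
    rw [PySem.List.pyRange_one_append 0 1 (tt.length : Int) (by omega) (by omega),
        List.filter_append]
    have h01 : PySem.List.pyRange 0 1 = [(0 : Int)] := by
      simpa using PySem.List.pyRange_one_singleton 0
    rw [h01]
    rw [show PySem.List.pyRange 1 (tt.length : Int) =
          (PySem.List.pyRange 0 ((tt.length : Int) - 1)).map (fun j => j + 1) by
        conv_lhs => rw [show ((tt.length : Int)) = ((tt.length : Int) - 1) + 1 by omega]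
        exact pv_range_shift _ (by omega)]
    rw [List.filter_map, List.filter_map, List.map_map]
    simp only [List.filter_cons, List.filter_nil, lt_self_iff_false, decide_false,
      Bool.false_and]
    rw [List.filter_congr (q := (fun p => pvInsertTags.contains (p.2.1 ++ "/" ++ p.2.2)) ∘
          (fun j => (j, PySem.List.pyGetD
            ((List.map (fun x => x.2) tt).zip (List.map (fun x => x.2) tt).tail) j ("", ""))))
        ?_]
    · apply List.map_congr_left
      intro j _
      simp [Function.comp]
    · intro j hj
      obtain ⟨hj0, hj1⟩ := PySem.List.mem_pyRange_one.mp hj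
      simp only [Function.comp]
      rw [pv_getZ _ j hj0 (by simpa using hj1)]
      have e1 : j + 1 - 1 = j := by ring
      rw [e1]
      have e2 : decide ((0 : Int) < j + 1) = true := by simp; omega
      rw [e2, Bool.true_and]
      simp only [pv_tag]
  · -- merge
    rw [PySem.List.pyRange_one_append 0 ((tt.length : Int) - 1) (tt.length : Int)
          (by omega) (by omega), List.filter_append]
    have hsing := PySem.List.pyRange_one_singleton ((tt.length : Int) - 1)
    rw [show ((tt.length : Int) - 1) + 1 = (tt.length : Int) by omega] at hsing
    rw [hsing]
    rw [List.filter_map, List.map_map]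
    simp only [List.filter_cons, List.filter_nil, lt_self_iff_false, decide_false,
      Bool.false_and]
    rw [List.filter_congr (q := (fun p => pvMergeTags.contains (p.2.1 ++ "/" ++ p.2.2)) ∘
          (fun j => (j, PySem.List.pyGetD
            ((List.map (fun x => x.2) tt).zip (List.map (fun x => x.2) tt).tail) j ("", ""))))
        ?_]
    · simp [Function.comp_def]
    · intro j hj
      obtain ⟨hj0, hj1⟩ := PySem.List.mem_pyRange_one.mp hj
      simp only [Function.comp]
      rw [pv_getZ _ j hj0 (by simpa using hj1)]
      have e2 : decide (j < (tt.length : Int) - 1) = true := by simp; omega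
      rw [e2, Bool.true_and]
      simp only [pv_tag]

-- ---- B side: grouping-dictionary characterizations ----

theorem pv_uni_getD (tags : List String) (t : String) :
    ((PySem.List.enumerate tags 0).foldl
        (fun (d : PySem.Dict String (List Int)) p => d.modify p.2 [] (· ++ [p.1]))
        PySem.Dict.empty).getD t []
      = ((PySem.List.enumerate tags 0).filter (fun p => p.2 == t)).map (fun p => p.1) := by
  rw [show (PySem.List.enumerate tags 0).foldl
        (fun (d : PySem.Dict String (List Int)) p => d.modify p.2 [] (· ++ [p.1]))
        PySem.Dict.empty
      = ((PySem.List.enumerate tags 0).map (fun p => (p.2, p.1))).foldl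
        (fun (d : PySem.Dict String (List Int)) q => d.modify q.1 [] (· ++ [q.2]))
        PySem.Dict.empty from
      (List.foldl_map (f := fun p => (p.2, p.1))
        (g := fun (d : PySem.Dict String (List Int)) q => d.modify q.1 [] (· ++ [q.2]))
        (l := PySem.List.enumerate tags 0) (init := PySem.Dict.empty)).symm]
  rw [PySem.Dict.getD_foldl_modify_append]
  simp [List.filter_map, List.map_map, Function.comp_def]

theorem pv_bi_getD (tags : List String) (bg : String) :
    ((PySem.List.enumerate (tags.zip tags.tail) 0).foldl
        (fun (d : PySem.Dict String (List Int)) p => d.modify (p.2.1 ++ "/" ++ p.2.2) [] (· ++ [p.1]))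
        PySem.Dict.empty).getD bg []
      = ((PySem.List.enumerate (tags.zip tags.tail) 0).filter
          (fun p => (p.2.1 ++ "/" ++ p.2.2) == bg)).map (fun p => p.1) := by
  rw [show (PySem.List.enumerate (tags.zip tags.tail) 0).foldl
        (fun (d : PySem.Dict String (List Int)) p => d.modify (p.2.1 ++ "/" ++ p.2.2) [] (· ++ [p.1]))
        PySem.Dict.empty
      = ((PySem.List.enumerate (tags.zip tags.tail) 0).map (fun p => (p.2.1 ++ "/" ++ p.2.2, p.1))).foldl
        (fun (d : PySem.Dict String (List Int)) q => d.modify q.1 [] (· ++ [q.2]))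
        PySem.Dict.empty from
      (List.foldl_map (f := fun p => (p.2.1 ++ "/" ++ p.2.2, p.1))
        (g := fun (d : PySem.Dict String (List Int)) q => d.modify q.1 [] (· ++ [q.2]))
        (l := PySem.List.enumerate (tags.zip tags.tail) 0) (init := PySem.Dict.empty)).symm]
  rw [PySem.Dict.getD_foldl_modify_append]
  simp [List.filter_map, List.map_map, Function.comp_def]

-- two disjoint filters, appended, are a permutation of the disjunction filter
theorem pv_filter_disjoint {α : Type} (p q : α → Bool) (E : List α)
    (h : ∀ x ∈ E, p x = true → q x = false) :
    (E.filter p ++ E.filter q).Perm (E.filter (fun x => p x || q x)) := by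
  induction E with
  | nil => simp
  | cons a E' ih =>
    have ih' := ih (fun x hx => h x (List.mem_cons_of_mem a hx))
    simp only [List.filter_cons]
    cases hp : p a with
    | true =>
      have hq : q a = false := h a (List.mem_cons_self) hp
      rw [hq]
      simp only [Bool.true_or]
      simp only [if_true, if_false, Bool.false_eq_true, List.cons_append]
      exact ih'.cons a
    | false =>
      cases hq : q a with
      | true =>
        simp only [Bool.false_or, if_true, if_false, Bool.false_eq_true]
        exact List.perm_middle.trans (ih'.cons a)
      | false =>
        simp only [Bool.false_or, if_false, Bool.false_eq_true]
        exact ih'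
  
-- collecting per-tag groups over a duplicate-free tag list permutes the membership filter
theorem pv_flatMap_filter_perm {β : Type} (S : List String) (E : List (Int × β))
    (key : β → String) (hS : S.Nodup) :
    (S.flatMap (fun t => E.filter (fun p => key p.2 == t))).Perm
      (E.filter (fun p => S.contains (key p.2))) := by
  induction S with
  | nil => simp
  | cons t S' ih =>
    rw [List.nodup_cons] at hS
    obtain ⟨ht, hS'⟩ := hS
    have step := (List.Perm.append_left (E.filter (fun p => key p.2 == t)) (ih hS'))
    rw [List.flatMap_cons]
    refine step.trans ?_
    refine (pv_filter_disjoint _ _ E ?_).trans ?_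
    · intro x _ hpx
      have : key x.2 = t := by exact eq_of_beq hpx
      rw [this]
      by_contra hc
      exact ht (by simpa using Bool.of_not_eq_false hc)
    · apply List.Perm.of_eq
      apply List.filter_congr
      intro x _
      by_cases h : key x.2 = t <;> simp [h]

-- sorting the grouped positions recovers the ascending membership filter
theorem pv_group_sort {β : Type} (S : List String) (E : List (Int × β)) (key : β → String)
    (g : Int → Int) (hS : S.Nodup) (hE : E.Pairwise (fun a b => a.1 < b.1))
    (hg : ∀ a b : Int, a < b → g a < g b) :
    PySem.List.sorted
        ((S.flatMap (fun t => (E.filter (fun p => key p.2 == t)).map (fun p => p.1))).map g)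
        (fun x => x) false
      = ((E.filter (fun p => S.contains (key p.2))).map (fun p => p.1)).map g := by
  apply PySem.List.sorted_eq_of_perm_of_pairwise_lt
  · -- permutation
    have h1 := pv_flatMap_filter_perm S E key hS
    have h2 : (S.flatMap (fun t => (E.filter (fun p => key p.2 == t)).map (fun p => p.1)))
        = (S.flatMap (fun t => E.filter (fun p => key p.2 == t))).map (fun p => p.1) := by
      rw [List.map_flatMap]
    rw [h2]
    exact ((h1.map (fun p => p.1)).map g).symm
  · -- strictly increasing
    have hf : (E.filter (fun p => S.contains (key p.2))).Pairwise (fun a b => a.1 < b.1) :=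
      hE.sublist List.filter_sublist
    rw [List.pairwise_map, List.pairwise_map]
    exact hf.imp (fun h => hg _ _ h)

-- B reduces to the canonical form
theorem pv_alt_eq_canon (tt : List (String × String)) :
    index_from_pos_tag_alt tt = pvCanon tt := by
  simp only [index_from_pos_tag_alt, pvCanon]
  rw [pv_foldl2]
  simp only [List.nil_append, Prod.mk.injEq]
  refine ⟨?_, ?_, ?_⟩
  · -- replace
    simp only [pv_uni_getD]
    have h := pv_group_sort pvReplaceTags (PySem.List.enumerate (tt.map (·.2)) 0)
        (fun s => s) (fun x => x) (by decide) (PySem.List.pairwise_lt_enumerate _ _)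
        (fun a b hab => hab)
    simp only [List.map_id'] at h
    rw [h]
    exact (pv_filterMap_if_map (fun p : Int × String => pvReplaceTags.contains p.2) (fun p => p.1) _).symm
  · -- insert
    simp only [pv_bi_getD]
    rw [show pvInsertTags.flatMap
          (fun bg => (((PySem.List.enumerate ((tt.map (·.2)).zip (tt.map (·.2)).tail) 0).filter
              (fun p => (p.2.1 ++ "/" ++ p.2.2) == bg)).map (fun p => p.1)).map (fun x => x + 1))
        = (pvInsertTags.flatMap
            (fun bg => ((PySem.List.enumerate ((tt.map (·.2)).zip (tt.map (·.2)).tail) 0).filter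
              (fun p => (p.2.1 ++ "/" ++ p.2.2) == bg)).map (fun p => p.1))).map (fun x => x + 1)
        from List.map_flatMap.symm]
    have h := pv_group_sort pvInsertTags
        (PySem.List.enumerate ((tt.map (·.2)).zip (tt.map (·.2)).tail) 0)
        (fun q => q.1 ++ "/" ++ q.2) (fun x => x + 1) (by decide)
        (PySem.List.pairwise_lt_enumerate _ _) (fun a b hab => by simpa using (by omega : a + 1 < b + 1))
    simp only [List.map_map, Function.comp_def] at h ⊢
    exact h
  · -- merge
    simp only [pv_bi_getD]
    have h := pv_group_sort pvMergeTags
        (PySem.List.enumerate ((tt.map (·.2)).zip (tt.map (·.2)).tail) 0)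
        (fun q => q.1 ++ "/" ++ q.2) (fun x => x) (by decide)
        (PySem.List.pairwise_lt_enumerate _ _) (fun a b hab => hab)
    simp only [List.map_id'] at h
    rw [h]

theorem pv_main (token_tags : List (String × String)) :
    index_from_pos_tag token_tags = index_from_pos_tag_alt token_tags := by
  rcases token_tags with _ | ⟨hd, tl⟩
  · decide
  · exact (pv_A_eq_canon_pos _ (by simp)).trans (pv_alt_eq_canon _).symm

-- ===== VERDICT (by name: the statement is the Claim_ definition above) =====
theorem index_from_pos_tag_spec : Claim_equal_index_from_pos_tag := by
  intro tt _
  unfold Spec_index_from_pos_tag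
  exact pv_main tt
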